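-- pv_equiv track=rewrite | github.com/CGCL-codes/media-bias | experiment/writing_bias/util_count.py | count_sentence_length
-- ===== SOURCE A (Python) =====
-- def count_sentence_length(corpus_sentence_word_list):
--     len_2_count = {'0-10':0, '10-20':0, '20-30':0, '>=30':0}  #
--     for sentence in corpus_sentence_word_list:
--         if len(sentence) < 10:
--             len_2_count['0-10'] += 1
--         if len(sentence) >=10 and len(sentence) < 20:
--             len_2_count['10-20'] += 1
--         if len(sentence) >=20 and len(sentence) < 30:
--             len_2_count['20-30'] += 1
--         if len(sentence) >=30:
--             len_2_count['>=30'] += 1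
--     return len_2_count
-- ===== SOURCE B (Python) =====
-- def count_sentence_length(corpus_sentence_word_list):
--     def below(t):
--         return sum(len(s) < t for s in corpus_sentence_word_list)
--     a, b, c = below(10), below(20), below(30)
--     n = len(corpus_sentence_word_list)
--     return {'0-10': a, '10-20': b - a, '20-30': c - b, '>=30': n - c}
-- ===== Notes on version B (the rewrite author's own statement) =====
-- stated objective: alternative
-- what changed: Instead of classifying each sentence into one of four buckets in a single pass over a dict, B makes three whole-list counting passes computing the cumulative populations below the thresholds 10/20/30 and derives each bucket count by subtraction of adjacent prefix counts (and from the total length for the last bucket).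
import Mathlib
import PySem

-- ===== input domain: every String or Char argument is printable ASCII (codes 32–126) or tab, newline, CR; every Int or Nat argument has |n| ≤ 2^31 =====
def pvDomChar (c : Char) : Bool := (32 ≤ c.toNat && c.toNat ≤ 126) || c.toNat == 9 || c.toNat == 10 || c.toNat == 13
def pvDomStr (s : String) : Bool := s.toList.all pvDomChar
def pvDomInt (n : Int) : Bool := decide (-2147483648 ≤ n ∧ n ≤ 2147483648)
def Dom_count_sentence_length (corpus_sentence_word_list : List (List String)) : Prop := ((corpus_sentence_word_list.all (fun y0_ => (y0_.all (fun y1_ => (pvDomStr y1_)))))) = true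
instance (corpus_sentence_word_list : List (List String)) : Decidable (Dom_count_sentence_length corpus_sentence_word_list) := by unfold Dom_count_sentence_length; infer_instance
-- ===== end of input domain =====

-- B replaces A's per-element four-way bucket classification by three whole-list counting
-- passes (cumulative populations below 10/20/30) and derives each bucket by subtraction (alternative).

-- ===== PORT A =====
def count_sentence_length (corpus_sentence_word_list : List (List String)) : List (String × Int) :=
  (corpus_sentence_word_list.foldl
    (fun (d : PySem.Dict String Int) sentence =>
      let d := if sentence.length < 10 then d.modify "0-10" 0 (· + 1) else d
      let d := if 10 ≤ sentence.length ∧ sentence.length < 20 then d.modify "10-20" 0 (· + 1) else d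
      let d := if 20 ≤ sentence.length ∧ sentence.length < 30 then d.modify "20-30" 0 (· + 1) else d
      if 30 ≤ sentence.length then d.modify ">=30" 0 (· + 1) else d)
    (PySem.Dict.ofList [("0-10", 0), ("10-20", 0), ("20-30", 0), (">=30", 0)])).items

-- ===== PORT B =====
-- below t = sum(len(s) < t for s in …): a counting pass over the whole list
def pvBelow (corpus_sentence_word_list : List (List String)) (t : Nat) : Int :=
  corpus_sentence_word_list.foldl
    (fun acc s => acc + (if s.length < t then (1 : Int) else 0)) 0

def count_sentence_length_alt (corpus_sentence_word_list : List (List String)) : List (String × Int) :=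
  let a := pvBelow corpus_sentence_word_list 10
  let b := pvBelow corpus_sentence_word_list 20
  let c := pvBelow corpus_sentence_word_list 30
  let n : Int := corpus_sentence_word_list.length
  [("0-10", a), ("10-20", b - a), ("20-30", c - b), (">=30", n - c)]

-- ===== PRECONDITION & SPEC =====
def Spec_count_sentence_length (corpus_sentence_word_list : List (List String)) (out : List (String × Int)) : Prop := out = count_sentence_length_alt corpus_sentence_word_list
instance (corpus_sentence_word_list : List (List String)) (out : List (String × Int)) : Decidable (Spec_count_sentence_length corpus_sentence_word_list out) := by unfold Spec_count_sentence_length; infer_instance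

-- ===== CLAIM =====
def Claim_equal_count_sentence_length : Prop := ∀ (corpus_sentence_word_list : List (List String)), Dom_count_sentence_length corpus_sentence_word_list → Spec_count_sentence_length corpus_sentence_word_list (count_sentence_length corpus_sentence_word_list)

-- ===== LEMMAS AND PROOFS =====

-- A's loop body
def pvStepA (d : PySem.Dict String Int) (sentence : List String) : PySem.Dict String Int :=
  let d := if sentence.length < 10 then d.modify "0-10" 0 (· + 1) else d
  let d := if 10 ≤ sentence.length ∧ sentence.length < 20 then d.modify "10-20" 0 (· + 1) else d
  let d := if 20 ≤ sentence.length ∧ sentence.length < 30 then d.modify "20-30" 0 (· + 1) else d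
  if 30 ≤ sentence.length then d.modify ">=30" 0 (· + 1) else d

-- one step of A on a literal 4-entry dict, as pure counter arithmetic
lemma pvStep_eq (a b c d : Int) (s : List String) :
    pvStepA (PySem.Dict.mk [("0-10", a), ("10-20", b), ("20-30", c), (">=30", d)]) s
      = PySem.Dict.mk [("0-10", a + (if s.length < 10 then 1 else 0)),
                       ("10-20", b + (if 10 ≤ s.length ∧ s.length < 20 then 1 else 0)),
                       ("20-30", c + (if 20 ≤ s.length ∧ s.length < 30 then 1 else 0)),
                       (">=30", d + (if 30 ≤ s.length then 1 else 0))] := by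
  have h4 : s.length < 10 ∨ (10 ≤ s.length ∧ s.length < 20) ∨ (20 ≤ s.length ∧ s.length < 30) ∨ 30 ≤ s.length := by omega
  rcases h4 with h | h | h | h <;>
  · have c1 : (s.length < 10) = (decide (s.length < 10) = true) := by simp
    have c2 : (10 ≤ s.length ∧ s.length < 20) = (decide (10 ≤ s.length ∧ s.length < 20) = true) := by simp
    have c3 : (20 ≤ s.length ∧ s.length < 30) = (decide (20 ≤ s.length ∧ s.length < 30) = true) := by simp
    have c4 : (30 ≤ s.length) = (decide (30 ≤ s.length) = true) := by simp
    simp only [pvStepA]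
    split_ifs with g1 g2 g3 g4 <;> try omega
    all_goals simp [PySem.Dict.modify, PySem.Dict.insert, PySem.Dict.getD, PySem.Dict.get?]

lemma pvBelow_shift (xs : List (List String)) (t : Nat) : ∀ (acc : Int),
    xs.foldl (fun acc s => acc + (if s.length < t then (1 : Int) else 0)) acc
      = acc + pvBelow xs t := by
  induction xs with
  | nil => intro acc; simp [pvBelow]
  | cons s xs ih =>
      intro acc
      have hx : pvBelow (s :: xs) t
          = (if s.length < t then (1:Int) else 0) + pvBelow xs t := by
        simp only [pvBelow, List.foldl_cons, zero_add]; exact ih _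
      rw [List.foldl_cons, ih, hx]; ring

lemma pvFold_eq (xs : List (List String)) : ∀ (a b c d : Int),
    xs.foldl pvStepA (PySem.Dict.mk [("0-10", a), ("10-20", b), ("20-30", c), (">=30", d)])
      = PySem.Dict.mk [("0-10", a + pvBelow xs 10),
                       ("10-20", b + (pvBelow xs 20 - pvBelow xs 10)),
                       ("20-30", c + (pvBelow xs 30 - pvBelow xs 20)),
                       (">=30", d + ((xs.length : Int) - pvBelow xs 30))] := by
  induction xs with
  | nil => intro a b c d; simp [pvBelow]
  | cons s xs ih =>
      intro a b c d
      rw [List.foldl_cons, pvStep_eq, ih]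
      have e10 : pvBelow (s :: xs) 10 = (if s.length < 10 then (1:Int) else 0) + pvBelow xs 10 := by
        simp only [pvBelow, List.foldl_cons, zero_add]; exact pvBelow_shift xs 10 _
      have e20 : pvBelow (s :: xs) 20 = (if s.length < 20 then (1:Int) else 0) + pvBelow xs 20 := by
        simp only [pvBelow, List.foldl_cons, zero_add]; exact pvBelow_shift xs 20 _
      have e30 : pvBelow (s :: xs) 30 = (if s.length < 30 then (1:Int) else 0) + pvBelow xs 30 := by
        simp only [pvBelow, List.foldl_cons, zero_add]; exact pvBelow_shift xs 30 _
      simp only [e10, e20, e30, List.length_cons]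
      congr 1
      split_ifs <;> simp_all <;> omega

-- ===== VERDICT =====
theorem count_sentence_length_spec : Claim_equal_count_sentence_length := by
  intro xs _
  unfold Spec_count_sentence_length count_sentence_length count_sentence_length_alt
  have hA : (fun (d : PySem.Dict String Int) sentence =>
      let d := if sentence.length < 10 then d.modify "0-10" 0 (· + 1) else d
      let d := if 10 ≤ sentence.length ∧ sentence.length < 20 then d.modify "10-20" 0 (· + 1) else d
      let d := if 20 ≤ sentence.length ∧ sentence.length < 30 then d.modify "20-30" 0 (· + 1) else d
      if 30 ≤ sentence.length then d.modify ">=30" 0 (· + 1) else d) = pvStepA := rfl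
  have hinit : PySem.Dict.ofList [("0-10", (0:Int)), ("10-20", 0), ("20-30", 0), (">=30", 0)]
      = PySem.Dict.mk [("0-10", 0), ("10-20", 0), ("20-30", 0), (">=30", 0)] := by decide
  rw [hA, hinit, pvFold_eq xs 0 0 0 0]
  simp
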